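-- pv_equiv track=rewrite | github.com/MrBrantCode/unitest_baseline | mut_generate/mist_train_taco/taco_8120/solution.py | find_non_matching_position
-- ===== SOURCE A (Python) =====
-- def find_non_matching_position(a, queries):
--     n = len(a)
--     p = [n] * n
--     stk = []
--
--     # Preprocess the array to find the next position where the value changes
--     for i in range(n):
--         while stk and a[stk[-1]] != a[i]:
--             p[stk.pop()] = i
--         stk.append(i)
--
--     results = []
--
--     # Process each query
--     for (l, r, x) in queries:
--         l -= 1  # Convert to 0-based index
--         r -= 1  # Convert to 0-based index
--
--         if a[l] != x:
--             results.append(l + 1)  # Convert back to 1-based index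
--         elif p[l] <= r:
--             results.append(p[l] + 1)  # Convert back to 1-based index
--         else:
--             results.append(-1)
--
--     return results
-- ===== SOURCE B (Python) =====
-- def find_non_matching_position(a, queries):
--     n = len(a)
--     p = [n] * n
--     # next index with a differing value, computed by one backward pass
--     for i in range(n - 2, -1, -1):
--         p[i] = i + 1 if a[i + 1] != a[i] else p[i + 1]
--     return [l if a[l - 1] != x else (p[l - 1] + 1 if p[l - 1] <= r - 1 else -1)
--             for (l, r, x) in queries]
-- ===== Notes on version B (the rewrite author's own statement) =====
-- stated objective: simpler
-- what changed: The forward stack-based preprocessing is replaced by a single backward pass computing p[i] = i+1 if a[i+1] != a[i] else p[i+1], dropping the stack entirely; the query answers are built with a comprehension instead of an append loop.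
import Mathlib
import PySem

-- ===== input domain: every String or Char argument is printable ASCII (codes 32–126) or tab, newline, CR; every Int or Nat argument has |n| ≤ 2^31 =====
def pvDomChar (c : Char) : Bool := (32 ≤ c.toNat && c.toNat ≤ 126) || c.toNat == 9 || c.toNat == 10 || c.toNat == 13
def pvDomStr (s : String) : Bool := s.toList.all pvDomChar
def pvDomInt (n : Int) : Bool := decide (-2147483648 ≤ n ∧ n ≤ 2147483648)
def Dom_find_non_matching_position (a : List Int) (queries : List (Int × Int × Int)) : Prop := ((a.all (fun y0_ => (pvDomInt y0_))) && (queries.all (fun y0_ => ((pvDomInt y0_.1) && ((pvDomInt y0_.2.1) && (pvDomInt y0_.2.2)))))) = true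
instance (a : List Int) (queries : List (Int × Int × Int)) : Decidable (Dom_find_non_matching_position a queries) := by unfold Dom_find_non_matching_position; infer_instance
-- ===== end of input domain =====

-- B replaces A's forward stack-based preprocessing with a single backward pass
-- (p[i] = i+1 if a[i+1] != a[i] else p[i+1]); simpler, same O(n + q) cost.

-- ===== PORT A =====
-- the inner `while stk and a[stk[-1]] != a[i]` loop (stack top = list head)
def pvPopLoop (a : List Int) (i : Nat) : List Int → List Nat → List Int × List Nat
  | p, [] => (p, [])
  | p, t :: rest =>
    if a.getD t 0 ≠ a.getD i 0 then pvPopLoop a i (p.set t (i : Int)) rest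
    else (p, t :: rest)

def find_non_matching_position (a : List Int) (queries : List (Int × Int × Int)) : List Int :=
  let n := a.length
  let st := (List.range n).foldl (fun st i =>
      let r := pvPopLoop a i st.1 st.2
      (r.1, i :: r.2)) (List.replicate n (n : Int), ([] : List Nat))
  let p := st.1
  queries.foldl (fun results q =>
      let l := q.1 - 1
      let r := q.2.1 - 1
      if PySem.List.pyGetD a l 0 ≠ q.2.2 then results ++ [l + 1]
      else if PySem.List.pyGetD p l 0 ≤ r then results ++ [PySem.List.pyGetD p l 0 + 1]
      else results ++ [(-1 : Int)]) []

-- ===== PORT B =====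
-- the backward loop `for i in range(n-2, -1, -1)`
def pvBuildP (a : List Int) : List Int :=
  let n := a.length
  ((List.range (n - 1)).reverse).foldl (fun p i =>
      p.set i (if a.getD (i + 1) 0 ≠ a.getD i 0 then ((i + 1 : Nat) : Int) else p.getD (i + 1) 0))
    (List.replicate n (n : Int))

def find_non_matching_position_alt (a : List Int) (queries : List (Int × Int × Int)) : List Int :=
  let p := pvBuildP a
  queries.map (fun q =>
      let l := q.1 - 1
      if PySem.List.pyGetD a l 0 ≠ q.2.2 then l + 1
      else if PySem.List.pyGetD p l 0 ≤ q.2.1 - 1 then PySem.List.pyGetD p l 0 + 1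
      else -1)

-- ===== PRECONDITION & SPEC =====
-- Pre_ excludes exactly the queries on which Python's a[l-1] raises IndexError
-- (l-1 outside [-n, n-1]); everywhere A returns, B matches it.
def Pre_find_non_matching_position (a : List Int) (queries : List (Int × Int × Int)) : Prop :=
  ∀ q ∈ queries, PySem.Raise.InRange a.length (q.1 - 1)
instance (a : List Int) (queries : List (Int × Int × Int)) : Decidable (Pre_find_non_matching_position a queries) := by unfold Pre_find_non_matching_position; infer_instance

def pvWitness_find_non_matching_position : List Int × (List (Int × Int × Int)) :=
  ([1, 1, 2], [(1, 3, 1), (3, 3, 2), (2, 2, 1)])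

def Spec_find_non_matching_position (a : List Int) (queries : List (Int × Int × Int)) (out : List Int) : Prop := out = find_non_matching_position_alt a queries
instance (a : List Int) (queries : List (Int × Int × Int)) (out : List Int) : Decidable (Spec_find_non_matching_position a queries out) := by unfold Spec_find_non_matching_position; infer_instance

-- ===== CLAIM (what is proved, stated in full; the proofs are below) =====
def Claim_equal_find_non_matching_position : Prop := ∀ (a : List Int) (queries : List (Int × Int × Int)), Dom_find_non_matching_position a queries → Pre_find_non_matching_position a queries → Spec_find_non_matching_position a queries (find_non_matching_position a queries)

-- ===== LEMMAS AND PROOFS =====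

-- the common specification: next index after i with a differing value, else len
def pvNd (a : List Int) (i : Nat) : Nat :=
  if h : i + 1 < a.length then
    (if a.getD (i + 1) 0 ≠ a.getD i 0 then i + 1 else pvNd a (i + 1))
  else a.length
termination_by a.length - i

theorem pvNd_eq_of_run (a : List Int) (m k : Nat) (hk : k ≤ a.length)
    (run : ∀ j, m ≤ j → j < k → a.getD j 0 = a.getD m 0)
    (hend : k < a.length → a.getD k 0 ≠ a.getD m 0) :
    ∀ j, m ≤ j → j < k → pvNd a j = k := by
  have H : ∀ d j, k ≤ j + d → m ≤ j → j < k → pvNd a j = k := by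
    intro d
    induction d with
    | zero => intro j h1 h2 h3; omega
    | succ d ih =>
      intro j h1 h2 h3
      rw [pvNd]
      by_cases hl : j + 1 < a.length
      · rw [dif_pos hl]
        by_cases hne : a.getD (j + 1) 0 ≠ a.getD j 0
        · rw [if_pos hne]
          by_cases hjk : j + 1 = k
          · exact hjk
          · exfalso
            have h4 : j + 1 < k := by omega
            have e1 := run (j + 1) (by omega) h4
            have e2 := run j h2 h3
            exact hne (e1.trans e2.symm)
        · rw [if_neg hne]
          push Not at hne
          have hjk : j + 1 < k := by
            by_contra hnot
            have hkj : k = j + 1 := by omega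
            have hkl : k < a.length := by omega
            have hc := hend hkl
            rw [hkj] at hc
            exact hc (hne.trans (run j h2 h3))
          exact ih (j + 1) (by omega) (by omega) hjk
      · rw [dif_neg hl]; omega
  intro j h1 h2; exact H k j (by omega) h1 h2

-- ===== B-side: the backward fold computes pvNd =====
def pvHB (a : List Int) (t : Nat) (p : List Int) : Prop :=
  p.length = a.length ∧ ∀ j, t ≤ j → j < a.length → p.getD j 0 = (pvNd a j : Int)

theorem pvHB_step (a : List Int) (t : Nat) (p : List Int) (ht : t + 2 ≤ a.length)
    (h : pvHB a (t + 1) p) :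
    pvHB a t (p.set t (if a.getD (t + 1) 0 ≠ a.getD t 0 then ((t + 1 : Nat) : Int) else p.getD (t + 1) 0)) := by
  obtain ⟨hlen, hval⟩ := h
  refine ⟨by simpa using hlen, ?_⟩
  intro j hj1 hj2
  by_cases hjt : j = t
  · subst hjt
    rw [List.getD_eq_getElem _ _ (by rw [List.length_set]; omega), List.getElem_set_self]
    rw [hval (j + 1) (by omega) (by omega)]
    conv_rhs => rw [pvNd]
    rw [dif_pos (show j + 1 < a.length by omega)]
    by_cases hc : a.getD (j + 1) 0 ≠ a.getD j 0
    · rw [if_pos hc, if_pos hc]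
    · rw [if_neg hc, if_neg hc]
  · rw [List.getD_eq_getElem?_getD, List.getElem?_set_ne (show t ≠ j from fun he => hjt he.symm), ← List.getD_eq_getElem?_getD]
    exact hval j (by omega) hj2

theorem pvHB_fold (a : List Int) :
    ∀ (t : Nat) (p : List Int), t + 1 ≤ a.length → pvHB a t p →
      pvHB a 0 (((List.range t).reverse).foldl (fun p i =>
        p.set i (if a.getD (i + 1) 0 ≠ a.getD i 0 then ((i + 1 : Nat) : Int) else p.getD (i + 1) 0)) p) := by
  intro t
  induction t with
  | zero => intro p _ h; simpa using h
  | succ t ih =>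
    intro p hle h
    rw [List.range_succ, List.reverse_append]
    simp only [List.reverse_singleton, List.singleton_append, List.foldl_cons]
    exact ih _ (by omega) (pvHB_step a t p (by omega) h)

theorem pvBuildP_spec (a : List Int) :
    pvBuildP a = (List.range a.length).map (fun j => ((pvNd a j : Nat) : Int)) := by
  rcases Nat.eq_zero_or_pos a.length with h0 | hpos
  · unfold pvBuildP
    simp [h0]
  · have hinit : pvHB a (a.length - 1) (List.replicate a.length ((a.length : Nat) : Int)) := by
      constructor
      · simp
      · intro j hj1 hj2
        have hj : j = a.length - 1 := by omega
        subst hj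
        rw [List.getD_eq_getElem _ _ (by simpa using hj2), List.getElem_replicate]
        rw [pvNd, dif_neg (by omega)]
    have h := pvHB_fold a (a.length - 1) _ (by omega) hinit
    obtain ⟨hlen, hval⟩ := h
    apply List.ext_getElem
    · unfold pvBuildP
      simpa using hlen
    · intro i h1 h2
      have hi : i < a.length := by simpa using h2
      have hv := hval i (Nat.zero_le i) hi
      rw [List.getD_eq_getElem _ _ (by omega)] at hv
      unfold pvBuildP
      simp only [List.getElem_map, List.getElem_range]
      exact hv

-- ===== A-side: the stack fold computes pvNd =====
def pvInvA (a : List Int) (i : Nat) (st : List Int × List Nat) : Prop :=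
  ∃ m, m ≤ i ∧ (0 < i → m < i) ∧ (i = 0 → m = 0) ∧
    st.2 = (List.range' m (i - m)).reverse ∧
    (∀ j, m ≤ j → j < i → a.getD j 0 = a.getD m 0) ∧
    st.1.length = a.length ∧
    (∀ j, j < m → st.1.getD j 0 = (pvNd a j : Int)) ∧
    (∀ j, m ≤ j → j < a.length → st.1.getD j 0 = ((a.length : Nat) : Int))

theorem pvPopLoop_all (a : List Int) (i : Nat) :
    ∀ (stk : List Nat) (p : List Int), (∀ t ∈ stk, a.getD t 0 ≠ a.getD i 0) →
      pvPopLoop a i p stk = (stk.foldl (fun p t => p.set t (i : Int)) p, []) := by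
  intro stk
  induction stk with
  | nil => intro p _; rfl
  | cons t rest ih =>
    intro p h
    rw [pvPopLoop, if_pos (h t (by simp))]
    exact ih _ (fun u hu => h u (by simp [hu]))

theorem pvSetAll_length (v : Int) :
    ∀ (stk : List Nat) (p : List Int), (stk.foldl (fun p t => p.set t v) p).length = p.length := by
  intro stk
  induction stk with
  | nil => intro p; rfl
  | cons t rest ih => intro p; rw [List.foldl_cons, ih]; simp

theorem pvSetAll_getD_notmem (v : Int) :
    ∀ (stk : List Nat) (p : List Int) (j : Nat), j ∉ stk →
      (stk.foldl (fun p t => p.set t v) p).getD j 0 = p.getD j 0 := by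
  intro stk
  induction stk with
  | nil => intro p j _; rfl
  | cons t rest ih =>
    intro p j h
    rw [List.foldl_cons, ih _ _ (by simp at h; exact h.2)]
    rw [List.getD_eq_getElem?_getD, List.getElem?_set_ne (by simp at h; omega), ← List.getD_eq_getElem?_getD]

theorem pvSetAll_getD_mem (v : Int) :
    ∀ (stk : List Nat) (p : List Int) (j : Nat), j ∈ stk → j < p.length →
      (stk.foldl (fun p t => p.set t v) p).getD j 0 = v := by
  intro stk
  induction stk with
  | nil => intro p j h _; simp at h
  | cons t rest ih =>
    intro p j h hlen
    rw [List.foldl_cons]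
    by_cases hr : j ∈ rest
    · exact ih _ _ hr (by simpa using hlen)
    · have hjt : j = t := by simp at h; tauto
      subst hjt
      rw [pvSetAll_getD_notmem v rest _ j hr]
      rw [List.getD_eq_getElem _ _ (by simpa using hlen), List.getElem_set_self]

theorem pvInvA_step (a : List Int) (i : Nat) (st : List Int × List Nat)
    (hi : i < a.length) (h : pvInvA a i st) :
    pvInvA a (i + 1) ((pvPopLoop a i st.1 st.2).1, i :: (pvPopLoop a i st.1 st.2).2) := by
  obtain ⟨m, hm1, hm2, hm3, hstk, hrun, hlen, hplo, hphi⟩ := h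
  rcases Nat.eq_zero_or_pos i with hz | hposi
  · subst hz
    have hm0 : m = 0 := hm3 rfl
    subst hm0
    simp only [Nat.sub_zero, List.range'_zero, List.reverse_nil] at hstk
    rw [hstk]
    refine ⟨0, by omega, by omega, by omega, ?_, ?_, ?_, ?_, ?_⟩
    · simp [pvPopLoop, List.range'_one]
    · intro j h1 h2
      have hj0 : j = 0 := by omega
      rw [hj0]
    · simpa [pvPopLoop] using hlen
    · intro j hj; omega
    · intro j hj1 hj2; simpa [pvPopLoop] using hphi j (by omega) hj2
  · have hmi : m < i := hm2 hposi
    by_cases hcase : a.getD i 0 = a.getD m 0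
    · -- value continues the run: top of stack equals a[i], no pop
      have hc : i - m = (i - m - 1) + 1 := by omega
      have hconcat : List.range' m (i - m) = List.range' m (i - m - 1) ++ [i - 1] := by
        have h1 : i - 1 = m + (i - m - 1) := by omega
        rw [h1]
        conv_lhs => rw [hc]
        exact List.range'_1_concat
      have hstk' : st.2 = (i - 1) :: (List.range' m (i - m - 1)).reverse := by
        rw [hstk, hconcat]; simp
      have hcond : ¬ (a.getD (i - 1) 0 ≠ a.getD i 0) := by
        have he := hrun (i - 1) (by omega) (by omega)
        simp only [ne_eq, not_not]
        rw [he, hcase]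
      have hnopop : pvPopLoop a i st.1 st.2 = (st.1, st.2) := by
        rw [hstk', pvPopLoop, if_neg hcond]
      rw [hnopop]
      refine ⟨m, by omega, by omega, by omega, ?_, ?_, hlen, hplo, hphi⟩
      · simp only []
        rw [hstk]
        rw [show i + 1 - m = (i - m) + 1 from by omega, List.range'_1_concat]
        rw [show m + (i - m) = i from by omega]
        simp
      · intro j h1 h2
        rcases Nat.lt_or_ge j i with hji | hji
        · exact hrun j h1 hji
        · have : j = i := by omega
          rw [this, hcase]
    · -- value breaks the run: everything is popped
      have hmem : ∀ t ∈ st.2, a.getD t 0 ≠ a.getD i 0 := by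
        intro t ht
        rw [hstk] at ht
        rw [List.mem_reverse, List.mem_range'_1] at ht
        rw [hrun t ht.1 (by omega)]
        exact fun he => hcase he.symm
      rw [pvPopLoop_all a i st.2 st.1 hmem]
      refine ⟨i, by omega, by omega, by omega, ?_, ?_, ?_, ?_, ?_⟩
      · simp [List.range'_one]
      · intro j h1 h2
        have hji : j = i := by omega
        rw [hji]
      · simp only []
        rw [pvSetAll_length]; exact hlen
      · intro j hj
        simp only []
        rcases Nat.lt_or_ge j m with hjm | hjm
        · rw [pvSetAll_getD_notmem]
          · exact hplo j hjm
          · rw [hstk, List.mem_reverse, List.mem_range'_1]; omega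
        · rw [pvSetAll_getD_mem]
          · have : pvNd a j = i := by
              apply pvNd_eq_of_run a m i (by omega) hrun
                (fun _ he => hcase he) j hjm hj
            rw [this]
          · rw [hstk, List.mem_reverse, List.mem_range'_1]; omega
          · omega
      · intro j hj1 hj2
        simp only []
        rw [pvSetAll_getD_notmem]
        · exact hphi j (by omega) hj2
        · rw [hstk, List.mem_reverse, List.mem_range'_1]; omega

theorem pvInvA_fold (a : List Int) :
    ∀ (k i : Nat) (st : List Int × List Nat), i + k ≤ a.length → pvInvA a i st →
      pvInvA a (i + k) ((List.range' i k).foldl (fun st i =>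
        let r := pvPopLoop a i st.1 st.2
        (r.1, i :: r.2)) st) := by
  intro k
  induction k with
  | zero => intro i st _ h; simpa using h
  | succ k ih =>
    intro i st hle h
    rw [List.range'_succ, List.foldl_cons]
    have := ih (i + 1) _ (by omega) (pvInvA_step a i st (by omega) h)
    rw [show i + 1 + k = i + (k + 1) from by omega] at this
    exact this

theorem portA_p_spec (a : List Int) :
    ((List.range a.length).foldl (fun st i =>
      let r := pvPopLoop a i st.1 st.2
      (r.1, i :: r.2)) (List.replicate a.length (a.length : Int), ([] : List Nat))).1
    = (List.range a.length).map (fun j => ((pvNd a j : Nat) : Int)) := by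
  have hinit : pvInvA a 0 (List.replicate a.length (a.length : Int), ([] : List Nat)) := by
    refine ⟨0, by omega, by omega, by omega, by simp, by omega, by simp, by omega, ?_⟩
    intro j _ hj
    rw [List.getD_eq_getElem _ _ (by simpa using hj), List.getElem_replicate]
  have h := pvInvA_fold a a.length 0 _ (by omega) hinit
  rw [← List.range_eq_range'] at h
  simp only [Nat.zero_add] at h
  obtain ⟨m, hm1, _, _, _, hrun, hlen, hplo, hphi⟩ := h
  have hall : ∀ j, j < a.length →
      ((List.range a.length).foldl (fun st i =>
        let r := pvPopLoop a i st.1 st.2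
        (r.1, i :: r.2)) (List.replicate a.length (a.length : Int), ([] : List Nat))).1.getD j 0
      = (pvNd a j : Int) := by
    intro j hj
    rcases Nat.lt_or_ge j m with hjm | hjm
    · exact hplo j hjm
    · rw [hphi j hjm hj]
      have : pvNd a j = a.length := by
        apply pvNd_eq_of_run a m a.length (by omega) hrun (by omega) j hjm hj
      rw [this]
  apply List.ext_getElem
  · simpa using hlen
  · intro i h1 h2
    have hi : i < a.length := by simpa using h2
    have hv := hall i hi
    rw [List.getD_eq_getElem _ _ (by omega)] at hv
    simp only [List.getElem_map, List.getElem_range]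
    exact hv

-- ===== VERDICT (by name: the statement is the Claim_ definition above) =====
theorem find_non_matching_position_spec : Claim_equal_find_non_matching_position := by
  intro a queries _ _
  unfold Spec_find_non_matching_position find_non_matching_position find_non_matching_position_alt
  dsimp only
  rw [portA_p_spec, ← pvBuildP_spec]
  rw [show (fun (results : List Int) (q : Int × Int × Int) =>
      let l := q.1 - 1
      let r := q.2.1 - 1
      if PySem.List.pyGetD a l 0 ≠ q.2.2 then results ++ [l + 1]
      else if PySem.List.pyGetD (pvBuildP a) l 0 ≤ r then results ++ [PySem.List.pyGetD (pvBuildP a) l 0 + 1]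
      else results ++ [(-1 : Int)])
    = (fun results q => results ++ [(fun q : Int × Int × Int =>
      let l := q.1 - 1
      if PySem.List.pyGetD a l 0 ≠ q.2.2 then l + 1
      else if PySem.List.pyGetD (pvBuildP a) l 0 ≤ q.2.1 - 1 then PySem.List.pyGetD (pvBuildP a) l 0 + 1
      else -1) q]) from by
        funext results q; dsimp only; split <;> [rfl; (split <;> rfl)]]
  simpa using PySem.List.foldl_append_singleton_eq_map _ queries ([] : List Int)
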